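-- pv_equiv track=rewrite | github.com/cfhaiteeh/PG-GSQL | preprocess_data.py | change2simple
-- ===== SOURCE A (Python) =====
-- def change2simple(sql):
--   nsql=[]
--   e=-1
--   for idx, x in enumerate(sql):
--
--     if idx<=e:
--       continue
--     if x=='on':
--       e=idx+7
--       continue
--     nsql.append(x)
--   nsql=remove_t1_t2(nsql)
--   return nsql
--
-- def remove_t1_t2(sql):
--   ri=['t1','t2','t3','t4','t5','t6','t7','t8','t9','.','as','join']
--   ans=[]
--   for x in sql:
--     if x in ri:
--       continue
--     ans.append(x)
--   return ans
-- ===== SOURCE B (Python) =====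
-- def change2simple(sql):
--     # Search-and-cut: repeatedly locate the next 'on' with list.index, flush the
--     # blacklist-filtered segment before it, and cut away 'on' plus 7 tokens.
--     drop = ('t1', 't2', 't3', 't4', 't5', 't6', 't7', 't8', 't9', '.', 'as', 'join')
--     out = []
--     rest = sql
--     while True:
--         try:
--             j = rest.index('on')
--         except ValueError:
--             out.extend(t for t in rest if t not in drop)
--             return out
--         out.extend(t for t in rest[:j] if t not in drop)
--         rest = rest[j + 8:]
-- ===== Notes on version B (the rewrite author's own statement) =====
-- stated objective: alternative
-- what changed: Replaces A's per-token enumerate scan with a skip-counter sentinel plus a second blacklist pass by a search-and-cut loop: list.index finds the next 'on', the filtered segment before it is flushed, and slicing cuts away 'on' plus 7 tokens; no per-token skip state is kept.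
import Mathlib
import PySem

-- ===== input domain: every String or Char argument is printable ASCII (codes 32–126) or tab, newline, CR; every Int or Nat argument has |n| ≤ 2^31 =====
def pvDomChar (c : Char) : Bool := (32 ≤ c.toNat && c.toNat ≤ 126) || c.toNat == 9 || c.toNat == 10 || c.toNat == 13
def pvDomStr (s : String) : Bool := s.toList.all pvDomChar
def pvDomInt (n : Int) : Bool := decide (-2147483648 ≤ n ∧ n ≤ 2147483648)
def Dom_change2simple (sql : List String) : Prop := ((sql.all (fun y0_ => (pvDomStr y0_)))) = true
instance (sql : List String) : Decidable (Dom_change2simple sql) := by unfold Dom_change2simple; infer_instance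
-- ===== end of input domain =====

-- B replaces A's per-token scan (skip-counter sentinel, then a second blacklist pass)
-- by a search-and-cut loop (list.index the next 'on', flush the filtered segment, slice
-- off the window); objective: alternative, same asymptotic cost.

-- ===== PORT A =====
def remove_t1_t2 (sql : List String) : List String :=
  let ri : List String := ["t1","t2","t3","t4","t5","t6","t7","t8","t9",".","as","join"]
  sql.foldl (fun ans x => if x ∈ ri then ans else ans ++ [x]) []

def change2simple (sql : List String) : List String :=
  let st := (PySem.List.enumerate sql 0).foldl
    (fun (p : List String × Int) (ix : Int × String) =>
      if ix.1 ≤ p.2 then p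
      else if ix.2 = "on" then (p.1, ix.1 + 7)
      else (p.1 ++ [ix.2], p.2)) ([], -1)
  remove_t1_t2 st.1

-- ===== PORT B =====
-- Source B's blacklist tuple
def altDrop : List String := ["t1","t2","t3","t4","t5","t6","t7","t8","t9",".","as","join"]

-- Source B's while loop: rest.index('on') (none = ValueError → flush filtered rest and
-- return), else flush the filtered prefix rest[:j] and continue with rest[j+8:]
def altGo (out rest : List String) : List String :=
  match h : PySem.List.index? rest "on" with
  | none => out ++ rest.filter (fun t => !(decide (t ∈ altDrop)))
  | some j =>
      altGo (out ++ (PySem.List.slice rest none (some (j : Int))).filter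
                      (fun t => !(decide (t ∈ altDrop))))
            (PySem.List.slice rest (some ((j : Int) + 8)) none)
termination_by rest.length
decreasing_by
  have hj : ((j : Int) + 8) = (((j + 8 : Nat) : Int)) := by push_cast; ring
  rw [hj, PySem.List.slice_from_natCast, List.length_drop]
  have hne : rest ≠ [] := by
    intro hnil; subst hnil
    rw [PySem.List.index?_eq_idxOf?] at h; simp at h
  have : 0 < rest.length := List.length_pos_iff.mpr hne
  omega

def change2simple_alt (sql : List String) : List String := altGo [] sql

-- ===== PRECONDITION & SPEC =====
def Spec_change2simple (sql : List String) (out : List String) : Prop := out = change2simple_alt sql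
instance (sql : List String) (out : List String) : Decidable (Spec_change2simple sql out) := by unfold Spec_change2simple; infer_instance

-- ===== CLAIM (what is proved, stated in full; the proofs are below) =====
def Claim_equal_change2simple : Prop := ∀ (sql : List String), Dom_change2simple sql → Spec_change2simple sql (change2simple sql)

-- ===== LEMMAS AND PROOFS =====

-- A's first loop, de-indexed: skip 'on' and the following 7 tokens
def skipPass : List String → List String
  | [] => []
  | x :: rest => if x = "on" then skipPass (rest.drop 7) else x :: skipPass rest
termination_by l => l.length
decreasing_by all_goals (simp [List.length_drop]; try omega)

-- A's enumerate fold computes skipPass of the part beyond the still-pending skip window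
theorem foldA_skipPass (l : List String) : ∀ (i e : Int) (acc : List String),
    ((PySem.List.enumerate l i).foldl
      (fun (p : List String × Int) (ix : Int × String) =>
        if ix.1 ≤ p.2 then p
        else if ix.2 = "on" then (p.1, ix.1 + 7)
        else (p.1 ++ [ix.2], p.2)) (acc, e)).1
    = acc ++ skipPass (l.drop ((e - i + 1).toNat)) := by
  induction l with
  | nil => intro i e acc; simp [PySem.List.enumerate, skipPass]
  | cons x rest ih =>
      intro i e acc
      rw [PySem.List.enumerate_cons, List.foldl_cons]
      by_cases h : i ≤ e
      · simp only [if_pos h]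
        rw [ih (i + 1) e acc]
        have hk : (e - i + 1).toNat = (e - (i + 1) + 1).toNat + 1 := by omega
        rw [hk, List.drop_succ_cons]
      · simp only [if_neg h]
        have h0 : (e - i + 1).toNat = 0 := by omega
        rw [h0, List.drop_zero]
        by_cases hx : x = "on"
        · simp only [hx, if_true]
          rw [ih (i + 1) (i + 7) acc]
          have h7 : (i + 7 - (i + 1) + 1).toNat = 7 := by omega
          rw [h7, skipPass, if_pos rfl]
        · simp only [if_neg hx]
          rw [ih (i + 1) e (acc ++ [x])]
          have h0' : (e - (i + 1) + 1).toNat = 0 := by omega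
          rw [h0', List.drop_zero, skipPass, if_neg hx, List.append_assoc]
          rfl

-- A's second loop is a filter
theorem remove_foldl (l : List String) : ∀ (acc : List String),
    l.foldl (fun ans x =>
        if x ∈ (["t1","t2","t3","t4","t5","t6","t7","t8","t9",".","as","join"] : List String)
        then ans else ans ++ [x]) acc
    = acc ++ l.filter (fun x => !(decide (x ∈ altDrop))) := by
  induction l with
  | nil => intro acc; simp
  | cons x rest ih =>
      intro acc
      rw [List.foldl_cons, ih, List.filter_cons]
      by_cases hx : x ∈ (["t1","t2","t3","t4","t5","t6","t7","t8","t9",".","as","join"] : List String)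
      · simp [altDrop, hx]
      · simp [altDrop, hx]

-- skipPass is the identity on a segment without 'on'
theorem skipPass_no_on (l : List String) (h : "on" ∉ l) : skipPass l = l := by
  induction l with
  | nil => simp [skipPass]
  | cons x rest ih =>
      have hx : x ≠ "on" := fun e => h (e ▸ List.mem_cons_self)
      rw [skipPass, if_neg hx, ih (fun hm => h (List.mem_cons_of_mem _ hm))]

-- skipPass passes an 'on'-free prefix through unchanged
theorem skipPass_append_no_on (pre l : List String) (h : "on" ∉ pre) :
    skipPass (pre ++ l) = pre ++ skipPass l := by
  induction pre with
  | nil => simp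
  | cons x rest ih =>
      have hx : x ≠ "on" := fun e => h (e ▸ List.mem_cons_self)
      rw [List.cons_append, skipPass, if_neg hx,
        ih (fun hm => h (List.mem_cons_of_mem _ hm)), List.cons_append]

-- B's search-and-cut loop computes the filtered skipPass
theorem altGo_eq (out rest : List String) :
    altGo out rest = out ++ (skipPass rest).filter (fun t => !(decide (t ∈ altDrop))) := by
  induction out, rest using altGo.induct with
  | case1 out rest h =>
      rw [altGo, h]
      have hno : "on" ∉ rest := (PySem.List.index?_eq_none_iff rest "on").mp h
      rw [skipPass_no_on rest hno]
  | case2 out rest j h ih =>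
      rw [altGo, h]
      dsimp only
      obtain ⟨pre, suf, hsplit, hlen, hpre⟩ := (PySem.List.index?_eq_some_iff rest "on" j).mp h
      have hslice1 : PySem.List.slice rest none (some (j : Int)) = pre := by
        rw [PySem.List.slice_to_natCast, hsplit, ← hlen, List.take_left]
      have hslice2 : PySem.List.slice rest (some ((j : Int) + 8)) none = suf.drop 7 := by
        have hj : ((j : Int) + 8) = (((j + 8 : Nat) : Int)) := by push_cast; ring
        rw [hj, PySem.List.slice_from_natCast, hsplit]
        rw [show j + 8 = pre.length + 8 by omega]
        simp
      rw [hslice1, hslice2] at ih ⊢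
      rw [ih, hsplit, skipPass_append_no_on pre _ hpre, skipPass, if_pos rfl,
        List.filter_append, List.append_assoc]

-- ===== VERDICT (by name: the statement is the Claim_ definition above) =====
theorem change2simple_spec : Claim_equal_change2simple := by
  intro sql _
  show change2simple sql = change2simple_alt sql
  unfold change2simple change2simple_alt remove_t1_t2
  simp only []
  rw [foldA_skipPass sql 0 (-1) []]
  simp only [show ((-1 : Int) - 0 + 1).toNat = 0 by omega, List.drop_zero, List.nil_append]
  rw [remove_foldl, altGo_eq, List.nil_append]
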